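-- pv_equiv track=rewrite | github.com/onusrat/chatbert | site/social/demo_script.py | render_tokens_multiline
-- ===== SOURCE A (Python) =====
-- RESET       = "\033[0m"
--
-- BOLD        = "\033[1m"
--
-- DIM         = "\033[2m"
--
-- WHITE       = "\033[37m"
--
-- BR_BLACK    = "\033[90m"
--
-- BR_GREEN    = "\033[92m"
--
-- BG_BLACK    = "\033[40m"
--
-- MASK_DISPLAY = "[MASK]"
--
-- def render_token(token, state, is_new=False):
--     """Render a single token with appropriate styling."""
--     if state == "masked":
--         return f"{DIM}{BR_BLACK}{MASK_DISPLAY}{RESET}"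
--     elif is_new:
--         return f"{BOLD}{BR_GREEN}{BG_BLACK}{token}{RESET}"
--     else:
--         return f"{WHITE}{token}{RESET}"
--
-- def render_tokens_multiline(tokens, states, new_indices=None, tokens_per_line=8):
--     """Render tokens wrapped across multiple lines."""
--     if new_indices is None:
--         new_indices = set()
--
--     lines = []
--     current_line = "    "
--     count = 0
--
--     for i, (token, state) in enumerate(zip(tokens, states)):
--         is_new = i in new_indices
--         rendered = render_token(token, state, is_new)
--
--         if token in {".", ",", "'s", "!"}:
--             spacer = ""
--         else:
--             spacer = " " if count > 0 else ""
--
--         current_line += spacer + rendered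
--         count += 1
--
--         if count >= tokens_per_line and i < len(tokens) - 1:
--             lines.append(current_line)
--             current_line = "    "
--             count = 0
--
--     if current_line.strip():
--         lines.append(current_line)
--
--     return "\n".join(lines)
-- ===== SOURCE B (Python) =====
-- RESET       = "\033[0m"
-- BOLD        = "\033[1m"
-- DIM         = "\033[2m"
-- WHITE       = "\033[37m"
-- BR_BLACK    = "\033[90m"
-- BR_GREEN    = "\033[92m"
-- BG_BLACK    = "\033[40m"
-- MASK_DISPLAY = "[MASK]"
--
-- NO_SPACE_BEFORE = {".", ",", "'s", "!"}
--
--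
-- def render_token(token, state, is_new=False):
--     if state == "masked":
--         return f"{DIM}{BR_BLACK}{MASK_DISPLAY}{RESET}"
--     elif is_new:
--         return f"{BOLD}{BR_GREEN}{BG_BLACK}{token}{RESET}"
--     else:
--         return f"{WHITE}{token}{RESET}"
--
--
-- def render_tokens_multiline(tokens, states, new_indices=None, tokens_per_line=8):
--     """Render tokens wrapped across multiple lines (chunked re-implementation)."""
--     if new_indices is None:
--         new_indices = set()
--
--     pairs = list(zip(tokens, states))
--     chunk_size = max(tokens_per_line, 1)
--
--     lines = []
--     for start in range(0, len(pairs), chunk_size):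
--         chunk = pairs[start:start + chunk_size]
--         line = "    "
--         for j, (token, state) in enumerate(chunk):
--             rendered = render_token(token, state, start + j in new_indices)
--             if token in NO_SPACE_BEFORE or j == 0:
--                 line += rendered
--             else:
--                 line += " " + rendered
--         lines.append(line)
--     return "\n".join(lines)
-- ===== Notes on version B (the rewrite author's own statement) =====
-- stated objective: alternative
-- what changed: B replaces A's single stateful accumulator loop (current_line/count with in-loop flushes and a final strip check) by slicing the zipped (token, state) pairs into chunks of max(tokens_per_line, 1) tokens and rendering each chunk independently into its line, using the global index for the new-token test and the within-chunk index for the spacer.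
import Mathlib
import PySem

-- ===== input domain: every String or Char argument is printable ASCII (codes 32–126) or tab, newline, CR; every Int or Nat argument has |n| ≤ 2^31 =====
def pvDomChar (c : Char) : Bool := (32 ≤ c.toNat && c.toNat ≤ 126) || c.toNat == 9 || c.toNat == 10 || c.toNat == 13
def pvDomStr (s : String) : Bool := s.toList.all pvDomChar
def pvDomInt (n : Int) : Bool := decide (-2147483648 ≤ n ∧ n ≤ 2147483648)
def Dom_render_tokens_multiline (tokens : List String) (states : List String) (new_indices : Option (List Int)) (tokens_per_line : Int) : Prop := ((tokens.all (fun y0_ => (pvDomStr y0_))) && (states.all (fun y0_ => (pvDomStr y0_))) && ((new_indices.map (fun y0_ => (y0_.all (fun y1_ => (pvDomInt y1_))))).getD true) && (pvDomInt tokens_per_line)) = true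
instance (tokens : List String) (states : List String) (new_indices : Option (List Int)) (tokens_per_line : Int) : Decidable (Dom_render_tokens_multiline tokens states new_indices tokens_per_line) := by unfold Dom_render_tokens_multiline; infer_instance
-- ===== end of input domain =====

-- B renders the token stream chunk by chunk (slice the zipped pairs into lines of
-- max(tokens_per_line, 1) tokens, render each line independently) instead of A's single
-- stateful accumulator loop; objective: alternative structure, same cost.

-- ===== PORT A =====
def pvRESET : String := "\x1b[0m"
def pvBOLD : String := "\x1b[1m"
def pvDIM : String := "\x1b[2m"
def pvWHITE : String := "\x1b[37m"
def pvBR_BLACK : String := "\x1b[90m"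
def pvBR_GREEN : String := "\x1b[92m"
def pvBG_BLACK : String := "\x1b[40m"
def pvMASK_DISPLAY : String := "[MASK]"

-- module-level helper render_token, used verbatim by both Pythons
def pyRenderToken (token : String) (state : String) (is_new : Bool) : String :=
  if state == "masked" then pvDIM ++ pvBR_BLACK ++ pvMASK_DISPLAY ++ pvRESET
  else if is_new then pvBOLD ++ pvBR_GREEN ++ pvBG_BLACK ++ token ++ pvRESET
  else pvWHITE ++ token ++ pvRESET

-- `token in {".", ",", "'s", "!"}`
def pvIsPunct (token : String) : Bool :=
  token == "." || token == "," || token == "'s" || token == "!"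

-- `i in new_indices` (empty set when None)
def pvMemNew (newIdx : Option (List Int)) (i : Int) : Bool :=
  match newIdx with
  | none => false
  | some l => l.contains i

-- A's for-loop over enumerate(zip(tokens, states)) with state (lines, current_line, count)
def aLoop (newIdx : Option (List Int)) (tpl n : Int) :
    List (Int × (String × String)) → List String → String → Int → List String × String
  | [], lines, cur, _count => (lines, cur)
  | (i, ts) :: rest, lines, cur, count =>
      let rendered := pyRenderToken ts.1 ts.2 (pvMemNew newIdx i)
      let spacer := if pvIsPunct ts.1 then "" else if count > 0 then " " else ""
      let cur2 := cur ++ (spacer ++ rendered)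
      let count2 := count + 1
      if count2 ≥ tpl ∧ i < n - 1 then
        aLoop newIdx tpl n rest (lines ++ [cur2]) "    " 0
      else
        aLoop newIdx tpl n rest lines cur2 count2

-- `if current_line.strip(): lines.append(current_line)`
def aFinish (lines : List String) (cur : String) : List String :=
  if PySem.Str.strip cur = "" then lines else lines ++ [cur]

def render_tokens_multiline (tokens : List String) (states : List String) (new_indices : Option (List Int)) (tokens_per_line : Int) : String :=
  let r := aLoop new_indices tokens_per_line (tokens.length : Int)
      (PySem.List.enumerate (tokens.zip states) 0) [] "    " 0
  PySem.Str.join "\n" (aFinish r.1 r.2)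

-- ===== PORT B =====
-- one token of a line: `line += rendered` / `line += " " + rendered`
def bStep (newIdx : Option (List Int)) (start : Int) (acc : String) (x : Int × String × String) : String :=
  let rendered := pyRenderToken x.2.1 x.2.2 (pvMemNew newIdx (start + x.1))
  if pvIsPunct x.2.1 || x.1 == 0 then acc ++ rendered else acc ++ (" " ++ rendered)

-- B's inner loop: render one chunk into one line
def bLine (newIdx : Option (List Int)) (start : Int) (chunk : List (String × String)) : String :=
  (PySem.List.enumerate chunk 0).foldl (bStep newIdx start) "    "

-- B's outer loop `for start in range(0, len(pairs), chunk_size)` with slicing,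
-- as structural recursion peeling off one chunk of size k+1 (= max(tokens_per_line, 1))
def bChunks (newIdx : Option (List Int)) (k : Nat) (start : Int) : List (String × String) → List String
  | [] => []
  | p :: rest =>
      bLine newIdx start ((p :: rest).take (k + 1)) ::
        bChunks newIdx k (start + ((k : Int) + 1)) ((p :: rest).drop (k + 1))
termination_by l => l.length
decreasing_by simp

def render_tokens_multiline_alt (tokens : List String) (states : List String) (new_indices : Option (List Int)) (tokens_per_line : Int) : String :=
  PySem.Str.join "\n"
    (bChunks new_indices ((max tokens_per_line 1).toNat - 1) 0 (tokens.zip states))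

-- ===== PRECONDITION & SPEC =====
def Spec_render_tokens_multiline (tokens : List String) (states : List String) (new_indices : Option (List Int)) (tokens_per_line : Int) (out : String) : Prop := out = render_tokens_multiline_alt tokens states new_indices tokens_per_line
instance (tokens : List String) (states : List String) (new_indices : Option (List Int)) (tokens_per_line : Int) (out : String) : Decidable (Spec_render_tokens_multiline tokens states new_indices tokens_per_line out) := by unfold Spec_render_tokens_multiline; infer_instance

-- ===== CLAIM (what is proved, stated in full; the proofs are below) =====
def Claim_equal_render_tokens_multiline : Prop := ∀ (tokens : List String) (states : List String) (new_indices : Option (List Int)) (tokens_per_line : Int), Dom_render_tokens_multiline tokens states new_indices tokens_per_line → Spec_render_tokens_multiline tokens states new_indices tokens_per_line (render_tokens_multiline tokens states new_indices tokens_per_line)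

-- ===== LEMMAS AND PROOFS =====

-- a character list ending in a non-space character does not strip to empty
lemma pv_strip_append_ne (cs : List Char) (c : Char) (h : PySem.Chars.isspace c = false) :
    PySem.Chars.strip (cs ++ [c]) ≠ [] := by
  have h1 : ∃ l, List.dropWhile PySem.Chars.isspace (cs ++ [c]) = l ++ [c] := by
    rw [List.dropWhile_append]
    split
    · exact ⟨[], by simp [h]⟩
    · exact ⟨_, rfl⟩
  obtain ⟨l, hl⟩ := h1
  simp only [PySem.Chars.strip, PySem.Chars.lstrip, PySem.Chars.rstrip, hl]
  simp [h]

-- every rendered token ends with pvRESET, whose last character is 'm'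
lemma pv_render_ends (token state : String) (b : Bool) :
    ∃ l, (pyRenderToken token state b).toList = l ++ ['m'] := by
  unfold pyRenderToken
  split
  · exact ⟨"\x1b[2m\x1b[90m[MASK]\x1b[0".toList, by decide⟩
  · split
    · exact ⟨("\x1b[1m\x1b[92m\x1b[40m" ++ token ++ "\x1b[0").toList, by
        simp [pvBOLD, pvBR_GREEN, pvBG_BLACK, pvRESET, String.toList_append]⟩
    · exact ⟨("\x1b[37m" ++ token ++ "\x1b[0").toList, by
        simp [pvWHITE, pvRESET, String.toList_append]⟩

lemma pv_strip_ne_of_ends (s : String) (l : List Char) (h : s.toList = l ++ ['m']) :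
    PySem.Str.strip s ≠ "" := by
  intro he
  have h2 := congrArg String.toList he
  rw [PySem.Str.toList_strip, h] at h2
  exact pv_strip_append_ne l 'm' (by decide) (by simpa using h2)

-- a line that received at least one token never strips to empty
lemma pv_strip_bStep (newIdx : Option (List Int)) (s : Int) (cur : String) (x : Int × String × String) :
    PySem.Str.strip (bStep newIdx s cur x) ≠ "" := by
  obtain ⟨l, hl⟩ := pv_render_ends x.2.1 x.2.2 (pvMemNew newIdx (s + x.1))
  unfold bStep
  split
  · exact pv_strip_ne_of_ends _ (cur.toList ++ l) (by simp [String.toList_append, hl])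
  · exact pv_strip_ne_of_ends _ (cur.toList ++ " ".toList ++ l) (by simp [String.toList_append, hl])

-- one loop-body step of A builds the same string as B's bStep
lemma pv_step (newIdx : Option (List Int)) (s : Int) (cur : String) (j : Nat) (tok st : String) :
    cur ++ ((if pvIsPunct tok then "" else if ((j : Int)) > 0 then " " else "") ++
        pyRenderToken tok st (pvMemNew newIdx (s + (j : Int)))) =
      bStep newIdx s cur ((j : Int), tok, st) := by
  by_cases hp : pvIsPunct tok
  · simp [bStep, hp]
  · by_cases hj : j = 0
    · subst hj; simp [bStep, hp]
    · have h0 : (((j : Int)) == 0) = false := by simp; omega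
      simp [bStep, hp, h0]
      exact hj

lemma pv_aLoop_nil (newIdx : Option (List Int)) (tpl n : Int) (lines : List String) (cur : String) (count : Int) :
    aLoop newIdx tpl n [] lines cur count = (lines, cur) := rfl

lemma pv_aLoop_cons (newIdx : Option (List Int)) (tpl n : Int) (i : Int) (tok st : String)
    (rest : List (Int × (String × String))) (lines : List String) (cur : String) (count : Int) :
    aLoop newIdx tpl n ((i, (tok, st)) :: rest) lines cur count =
      if count + 1 ≥ tpl ∧ i < n - 1 then
        aLoop newIdx tpl n rest
          (lines ++ [cur ++ ((if pvIsPunct tok then "" else if count > 0 then " " else "") ++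
            pyRenderToken tok st (pvMemNew newIdx i))]) "    " 0
      else
        aLoop newIdx tpl n rest lines
          (cur ++ ((if pvIsPunct tok then "" else if count > 0 then " " else "") ++
            pyRenderToken tok st (pvMemNew newIdx i))) (count + 1) := rfl

-- main invariant: A's accumulator loop, entered mid-line with j tokens already on the
-- current line (ch the tokens left on this line, rest the later lines' tokens),
-- produces exactly B's chunked lines
lemma pv_main (newIdx : Option (List Int)) (tpl n : Int) (k : Nat)
    (hk : (k : Int) + 1 = max tpl 1) :
    ∀ (m : Nat) (ch rest : List (String × String)) (j : Nat) (s : Int)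
      (lines : List String) (cur : String),
      ch.length + rest.length ≤ m →
      ch ≠ [] →
      j + ch.length ≤ k + 1 →
      (j + ch.length = k + 1 ∨ rest = []) →
      s + (j : Int) + ch.length + rest.length ≤ n →
      aFinish (aLoop newIdx tpl n (PySem.List.enumerate (ch ++ rest) (s + (j : Int))) lines cur (j : Int)).1
              (aLoop newIdx tpl n (PySem.List.enumerate (ch ++ rest) (s + (j : Int))) lines cur (j : Int)).2 =
        (lines ++ [(PySem.List.enumerate ch (j : Int)).foldl (bStep newIdx s) cur]) ++
          bChunks newIdx k (s + ((k : Int) + 1)) rest := by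
  have hmax := max_choice tpl 1
  have hws : PySem.Str.strip "    " = "" := by decide
  intro m
  induction m using Nat.strong_induction_on with
  | _ m ih =>
    intro ch rest j s lines cur hm hch hle hinv hn
    obtain ⟨⟨tok, st⟩, ch', rfl⟩ : ∃ p ch', ch = p :: ch' := by
      cases ch with
      | nil => exact absurd rfl hch
      | cons p t => exact ⟨p, t, rfl⟩
    simp only [List.length_cons] at hm hle hinv hn
    rw [List.cons_append, PySem.List.enumerate_cons, pv_aLoop_cons, pv_step]
    rw [PySem.List.enumerate_cons]
    by_cases hjk : j = k
    · -- last slot of the line: ch' = [] forced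
      have hch0 : ch' = [] := by
        cases ch' with
        | nil => rfl
        | cons a b => exfalso; simp only [List.length_cons] at hle; omega
      subst hch0
      have hcond : (j : Int) + 1 ≥ tpl := by rcases hmax with h | h <;> omega
      have henum1 : (PySem.List.enumerate ([] : List (String × String)) ((j : Int) + 1)).foldl
          (bStep newIdx s) (bStep newIdx s cur ((j : Int), tok, st))
          = bStep newIdx s cur ((j : Int), tok, st) := by
        rw [PySem.List.enumerate_nil]; rfl
      cases rest with
      | nil =>
        by_cases hlast : s + (j : Int) < n - 1
        · rw [if_pos ⟨hcond, hlast⟩]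
          rw [List.nil_append, PySem.List.enumerate_nil, pv_aLoop_nil]
          simp [aFinish, hws, bChunks]
        · rw [if_neg (by tauto)]
          rw [List.nil_append, PySem.List.enumerate_nil, pv_aLoop_nil]
          have hne := pv_strip_bStep newIdx s cur ((j : Int), tok, st)
          simp [aFinish, hne, bChunks]
      | cons r rs =>
        have hlast : s + (j : Int) < n - 1 := by
          simp only [List.length_cons] at hn; push_cast at hn; omega
        rw [if_pos ⟨hcond, hlast⟩]
        have htd : (r :: rs).take (k + 1) ++ (r :: rs).drop (k + 1) = r :: rs :=
          List.take_append_drop _ _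
        have hrec := ih (rs.length + 1) (by simp only [List.length_cons] at hm; omega)
          ((r :: rs).take (k + 1)) ((r :: rs).drop (k + 1))
          0 (s + ((k : Int) + 1)) (lines ++ [bStep newIdx s cur ((j : Int), tok, st)]) "    "
          (by simp only [List.length_take, List.length_drop, List.length_cons]; omega)
          (by simp)
          (by simp only [List.length_take, List.length_cons]; omega)
          (by
            by_cases h : rs.length + 1 ≤ k + 1
            · right
              rw [List.drop_eq_nil_iff]
              simpa using h
            · left
              simp only [List.length_take, List.length_cons, Nat.zero_add]
              omega)
          (by
            simp only [List.length_take, List.length_drop, List.length_cons]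
            simp only [List.length_cons] at hn
            push_cast at hn ⊢
            omega)
        rw [htd] at hrec
        have hc0 : (((0 : Nat) : Int)) = (0 : Int) := by norm_num
        rw [hc0] at hrec
        have hcast : s + ((k : Int) + 1) + (0 : Int) = s + (j : Int) + 1 := by
          rw [hjk]; ring
        rw [hcast] at hrec
        rw [List.nil_append]
        rw [hrec, bChunks]
        simp [bLine, PySem.List.enumerate_nil, List.append_assoc, hjk]
    · -- mid-line: no break
      have hnb : ¬ ((j : Int) + 1 ≥ tpl ∧ s + (j : Int) < n - 1) := by
        rintro ⟨h1, -⟩; rcases hmax with h | h <;> omega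
      rw [if_neg hnb]
      cases ch' with
      | nil =>
        -- short final chunk ends here: rest = []
        have hrest : rest = [] := by
          rcases hinv with h | h
          · exfalso; simp only [List.length_nil] at h; omega
          · exact h
        subst hrest
        rw [List.nil_append, PySem.List.enumerate_nil, pv_aLoop_nil]
        have hne := pv_strip_bStep newIdx s cur ((j : Int), tok, st)
        simp [aFinish, hne, bChunks, PySem.List.enumerate_nil]
      | cons p2 t2 =>
        simp only [List.length_cons] at hm hle hinv hn
        have hrec := ih (m - 1) (by omega) (p2 :: t2) rest (j + 1) s lines
          (bStep newIdx s cur ((j : Int), tok, st))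
          (by simp only [List.length_cons]; omega)
          (by simp)
          (by simp only [List.length_cons]; omega)
          (by
            rcases hinv with h | h
            · left; simp only [List.length_cons]; omega
            · right; exact h)
          (by
            simp only [List.length_cons]
            push_cast at hn ⊢
            omega)
        have hcast : s + ((j : Nat) + 1 : Nat) = s + (j : Int) + 1 := by push_cast; ring
        rw [hcast] at hrec
        have hcnt : (((j + 1 : Nat)) : Int) = (j : Int) + 1 := by push_cast; ring
        rw [hcnt] at hrec
        rw [List.cons_append] at hrec ⊢
        rw [hrec]
        rw [PySem.List.enumerate_cons]
        rfl

-- ===== VERDICT (by name: the statement is the Claim_ definition above) =====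
theorem render_tokens_multiline_spec : Claim_equal_render_tokens_multiline := by
  unfold Claim_equal_render_tokens_multiline
  intro tokens states new_indices tokens_per_line _hdom
  unfold Spec_render_tokens_multiline
  unfold render_tokens_multiline render_tokens_multiline_alt
  have hws : PySem.Str.strip "    " = "" := by decide
  set k := (max tokens_per_line 1).toNat - 1 with hkdef
  have hk : (k : Int) + 1 = max tokens_per_line 1 := by
    have h1 : (1 : Int) ≤ max tokens_per_line 1 := le_max_right _ _
    omega
  cases hzip : tokens.zip states with
  | nil =>
    simp [PySem.List.enumerate_nil, pv_aLoop_nil, aFinish, hws, bChunks]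
  | cons p ps =>
    have hlen : (p :: ps).length ≤ tokens.length := by
      rw [← hzip]
      simp [List.length_zip]
    have hmain := pv_main new_indices tokens_per_line (tokens.length : Int) k hk
      (ps.length + 1) ((p :: ps).take (k + 1)) ((p :: ps).drop (k + 1)) 0 0 [] "    "
      (by simp only [List.length_take, List.length_drop, List.length_cons]; omega)
      (by simp)
      (by simp only [List.length_take, List.length_cons]; omega)
      (by
        by_cases h : ps.length + 1 ≤ k + 1
        · right
          rw [List.drop_eq_nil_iff]
          simpa using h
        · left
          simp only [List.length_take, List.length_cons, Nat.zero_add]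
          omega)
      (by
        simp only [List.length_take, List.length_drop, List.length_cons]
        simp only [List.length_cons] at hlen
        push_cast
        omega)
    rw [List.take_append_drop] at hmain
    simp only [Nat.cast_zero, add_zero, zero_add] at hmain
    show PySem.Str.join "\n"
        (aFinish (aLoop new_indices tokens_per_line ((tokens.length : Int)) (PySem.List.enumerate (p :: ps) 0) [] "    " 0).1
                 (aLoop new_indices tokens_per_line ((tokens.length : Int)) (PySem.List.enumerate (p :: ps) 0) [] "    " 0).2) =
      PySem.Str.join "\n" (bChunks new_indices k 0 (p :: ps))
    rw [hmain, bChunks]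
    simp [bLine]
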